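-- pv_equiv track=rewrite | github.com/riddheshSajwan/data_structures_algorithm | math/magicNumber.py | solve
-- ===== SOURCE A (Python) =====
-- def solve(A):
--
--     magic_array = [0] + [0 for i in range(A)]
--     i = 1
--     exp = 1
--     while i <= A:
--         j = 1
--         magic_array[i] = pow(5,exp)
--         exp += 1
--         while j < i and i < A:
--             if i+j > A: break
--             magic_array[i+j] = magic_array[i]+magic_array[j]
--             j += 1
--         i += j
--     return magic_array[A]
-- ===== SOURCE B (Python) =====
-- def solve(A):
--     total = 0
--     power = 5
--     while A > 0:
--         if A & 1:
--             total += power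
--         power *= 5
--         A >>= 1
--     return total
-- ===== Notes on version B (the rewrite author's own statement) =====
-- stated objective: faster
-- what changed: Replaces the O(A)-size table of all magic numbers up to A with a direct O(log A) sum of 5^(bitpos+1) over the set bits of A's binary representation.
-- crash fix: For A <= -2, A raises IndexError (negative list index out of range) while B returns 0. — e.g. on solve(-2): A raises IndexError, B returns 0
import Mathlib
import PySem

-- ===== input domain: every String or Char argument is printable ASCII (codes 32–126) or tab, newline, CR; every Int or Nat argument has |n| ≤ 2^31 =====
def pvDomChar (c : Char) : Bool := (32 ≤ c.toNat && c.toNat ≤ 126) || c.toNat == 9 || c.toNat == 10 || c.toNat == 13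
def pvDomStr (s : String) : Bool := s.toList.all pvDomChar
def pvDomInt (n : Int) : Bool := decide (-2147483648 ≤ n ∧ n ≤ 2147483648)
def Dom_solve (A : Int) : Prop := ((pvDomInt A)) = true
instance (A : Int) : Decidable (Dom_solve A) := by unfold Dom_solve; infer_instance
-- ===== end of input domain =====

-- B replaces A's O(A)-size table of all magic numbers up to A by a direct sum of
-- 5^(bitpos+1) over the set bits of A (objective: faster, asymptotically).

-- ===== PORT A =====
-- inner 'while j < i and i < A' loop; fuel only makes the recursion total.
-- Reads magic_array[i] / magic_array[j] are ported with pyGet? (in range whenever the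
-- loop runs, so the .getD 0 default is never the value used); the write
-- magic_array[i+j] = … uses List.set at (i+j).toNat, exact since 0 ≤ i+j ≤ A there.
def solveInner (A i : Int) : Nat → Int → List Int → List Int × Int
  | 0, j, arr => (arr, j)
  | fuel+1, j, arr =>
    if j < i ∧ i < A then
      if A < i + j then (arr, j)
      else
        solveInner A i fuel (j+1)
          (arr.set (i+j).toNat (((PySem.List.pyGet? arr i).getD 0) + ((PySem.List.pyGet? arr j).getD 0)))
    else (arr, j)

-- outer 'while i <= A' loop; magic_array[i] = pow(5,exp) with 1 ≤ i ≤ A, exp ≥ 1,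
-- so List.set at i.toNat and 5 ^ exp.toNat are exact.
def solveOuter (A : Int) : Nat → Int → Int → List Int → List Int
  | 0, _, _, arr => arr
  | fuel+1, i, exp, arr =>
    if i ≤ A then
      let r := solveInner A i (A.toNat + 1) 1 (arr.set i.toNat ((5:Int) ^ exp.toNat))
      solveOuter A fuel (i + r.2) (exp + 1) r.1
    else arr

-- [0] + [0 for i in range(A)]; return magic_array[A] via pyGet? (some under Pre_solve).
def solve (A : Int) : Int :=
  (PySem.List.pyGet? (solveOuter A (A.toNat + 1) 1 1 ((0 : Int) :: List.replicate A.toNat 0)) A).getD 0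

-- ===== PORT B =====
-- 'while A > 0: if A & 1: total += power; power *= 5; A >>= 1'.
-- For a > 0, 'a & 1 = 1' is a % 2 = 1 and 'a >> 1' is a / 2 (Lean's Int ediv agrees
-- with Python's floor shift on nonnegative a); fuel only makes the recursion total.
def solveAltGo : Nat → Int → Int → Int → Int
  | 0, _, total, _ => total
  | fuel+1, a, total, power =>
    if 0 < a then
      solveAltGo fuel (a / 2) (if a % 2 = 1 then total + power else total) (power * 5)
    else total

def solve_alt (A : Int) : Int := solveAltGo (A.toNat + 1) A 0 5

-- ===== PRECONDITION & SPEC =====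
-- Pre_ excludes exactly A ≤ -2, where A raises IndexError (magic_array[A] on the
-- one-element list [0]); at A = -1 the negative index wraps to 0 and both return 0.
def Pre_solve (A : Int) : Prop := -1 ≤ A
instance (A : Int) : Decidable (Pre_solve A) := by unfold Pre_solve; infer_instance

def pvWitness_solve : Int := 7

-- For A <= -2, A raises IndexError (negative list index out of range) while B returns 0.
def Raises_solve (A : Int) : Prop := A ≤ -2
instance (A : Int) : Decidable (Raises_solve A) := by unfold Raises_solve; infer_instance
def pvRaiseWitness_solve : Int := -2
def pvRaiseWitnessOut_solve : Int := 0

def Spec_solve (A : Int) (out : Int) : Prop := out = solve_alt A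
instance (A : Int) (out : Int) : Decidable (Spec_solve A out) := by unfold Spec_solve; infer_instance

-- ===== CLAIM (what is proved, stated in full; the proofs are below) =====
def Claim_equal_solve : Prop := ∀ (A : Int), Dom_solve A → Pre_solve A → Spec_solve A (solve A)
def Claim_raises_solve : Prop := (∀ (A : Int), Dom_solve A → Raises_solve A → ¬ Pre_solve A) ∧ (Dom_solve (pvRaiseWitness_solve) ∧ Raises_solve (pvRaiseWitness_solve) ∧ solve_alt (pvRaiseWitness_solve) = pvRaiseWitnessOut_solve)

-- ===== LEMMAS AND PROOFS =====

-- the A-th magic number: sum of 5^(bitpos+1) over the set bits of A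
def magic : Nat → Int
  | 0 => 0
  | n+1 => 5 * magic ((n+1)/2) + 5 * (((n+1) % 2 : Nat) : Int)
decreasing_by omega

theorem magic_rec (n : Nat) : magic n = 5 * magic (n/2) + 5 * ((n % 2 : Nat) : Int) := by
  cases n with
  | zero => simp [magic]
  | succ m => rw [magic]

theorem magic_zero : magic 0 = 0 := by
  have h := magic_rec 0
  simp at h
  omega

theorem magic_pow (e : Nat) : magic (2^e) = 5^(e+1) := by
  induction e with
  | zero => rw [magic_rec]; simp [magic_zero]
  | succ e ih =>
      rw [magic_rec]
      have h1 : 2^(e+1)/2 = 2^e := by omega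
      have h2 : 2^(e+1) % 2 = 0 := by omega
      rw [h1, h2, ih]; push_cast; ring

theorem magic_add (e : Nat) : ∀ j : Nat, j < 2^e → magic (2^e + j) = magic (2^e) + magic j := by
  induction e with
  | zero =>
      intro j hj
      interval_cases j
      simp [magic_zero]
  | succ e ih =>
      intro j hj
      have hp : 0 < 2^e := Nat.two_pow_pos e
      rw [magic_rec (2^(e+1) + j)]
      have h1 : (2^(e+1) + j)/2 = 2^e + j/2 := by omega
      have h2 : (2^(e+1) + j) % 2 = j % 2 := by omega
      rw [h1, h2, ih (j/2) (by omega)]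
      rw [magic_rec (2^(e+1)), magic_rec j]
      have h3 : 2^(e+1)/2 = 2^e := by omega
      have h4 : 2^(e+1) % 2 = 0 := by omega
      rw [h3, h4]; push_cast; ring

theorem altGo_eq : ∀ (fuel : Nat) (a total p : Int), a.toNat ≤ fuel →
    solveAltGo fuel a total (5 * p) = total + p * magic a.toNat := by
  intro fuel
  induction fuel with
  | zero =>
      intro a total p h
      have ha : a.toNat = 0 := by omega
      simp [solveAltGo, ha, magic_zero]
  | succ f ih =>
      intro a total p h
      by_cases ha : 0 < a
      · have hd : (a/2).toNat = a.toNat/2 := by omega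
        have hf : (a/2).toNat ≤ f := by omega
        have h5 : (5*p)*5 = 5*(p*5) := by ring
        rw [solveAltGo, if_pos ha, h5, ih _ _ _ hf, hd, magic_rec a.toNat]
        have hmod : a % 2 = 1 ↔ (a.toNat % 2 : Nat) = 1 := by omega
        by_cases ho : a % 2 = 1
        · rw [if_pos ho]
          have : ((a.toNat % 2 : Nat) : Int) = 1 := by omega
          rw [this]; ring
        · rw [if_neg ho]
          have : ((a.toNat % 2 : Nat) : Int) = 0 := by omega
          rw [this]; ring
      · have ha0 : a.toNat = 0 := by omega
        rw [solveAltGo, if_neg ha, ha0]; simp [magic_zero]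

theorem solve_alt_eq (A : Int) : solve_alt A = magic A.toNat := by
  have : (5 : Int) = 5 * 1 := by ring
  rw [solve_alt, this, altGo_eq (A.toNat + 1) A 0 1 (by omega)]
  ring

theorem inner_spec (A i : Int) (h1 : 1 ≤ i) (hiA : i ≤ A)
    (hadd : ∀ jN : Nat, jN < i.toNat → magic (i.toNat + jN) = magic i.toNat + magic jN) :
    ∀ (fuel : Nat) (j : Int) (arr : List Int), 1 ≤ j → j ≤ i →
      arr.length = A.toNat + 1 →
      (∀ k : Nat, (k:Int) < i + j → arr[k]? = some (magic k)) →
      i - j < (fuel:Int) →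
      (solveInner A i fuel j arr).1.length = A.toNat + 1 ∧
      1 ≤ (solveInner A i fuel j arr).2 ∧ (solveInner A i fuel j arr).2 ≤ i ∧
      (∀ k : Nat, (k:Int) < i + (solveInner A i fuel j arr).2 →
        (solveInner A i fuel j arr).1[k]? = some (magic k)) ∧
      (A < i + (solveInner A i fuel j arr).2 ∨
        ((solveInner A i fuel j arr).2 = i ∧ i < A)) := by
  intro fuel
  induction fuel with
  | zero => intro j arr hj1 hji _ _ hfuel; omega
  | succ f ih =>
      intro j arr hj1 hji hlen hent hfuel
      by_cases hc : j < i ∧ i < A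
      · by_cases hb : A < i + j
        · rw [solveInner, if_pos hc, if_pos hb]
          exact ⟨hlen, hj1, hji, hent, Or.inl hb⟩
        · rw [solveInner, if_pos hc, if_neg hb]
          -- the two reads
          have hiv : PySem.List.pyGet? arr i = some (magic i.toNat) := by
            rw [PySem.List.pyGet?_of_nonneg _ (by omega)]
            have := hent i.toNat (by omega)
            simpa using this
          have hjv : PySem.List.pyGet? arr j = some (magic j.toNat) := by
            rw [PySem.List.pyGet?_of_nonneg _ (by omega)]
            have := hent j.toNat (by omega)
            simpa using this
          have hval : ((PySem.List.pyGet? arr i).getD 0) + ((PySem.List.pyGet? arr j).getD 0)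
              = magic ((i+j).toNat) := by
            rw [hiv, hjv]
            have h2 : (i+j).toNat = i.toNat + j.toNat := by omega
            rw [h2, hadd j.toNat (by omega)]
            simp
          have hidx : (i+j).toNat < arr.length := by omega
          refine ih (j+1) _ (by omega) (by omega) (by simpa using hlen) ?_ (by omega)
          intro k hk
          by_cases hkij : k = (i+j).toNat
          · subst hkij
            rw [List.getElem?_set_self hidx, hval]
          · rw [List.getElem?_set_ne (by omega)]
            exact hent k (by omega)
      · rw [solveInner, if_neg hc]
        refine ⟨hlen, hj1, hji, hent, ?_⟩
        by_cases hA : i < A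
        · exact Or.inr ⟨by omega, hA⟩
        · exact Or.inl (by omega)

theorem outer_done (A : Int) (fuel : Nat) (i exp : Int) (arr : List Int) (h : A < i) :
    solveOuter A fuel i exp arr = arr := by
  cases fuel with
  | zero => rfl
  | succ f => rw [solveOuter, if_neg (by omega)]

theorem outer_spec (A : Int) :
    ∀ (fuel : Nat) (i exp : Int) (e : Nat) (arr : List Int),
      i = (2:Int)^e → exp = (e:Int) + 1 →
      arr.length = A.toNat + 1 →
      (∀ k : Nat, (k:Int) < i → arr[k]? = some (magic k)) →
      A - i < (fuel:Int) →
      ∀ k : Nat, (k:Int) ≤ A → (solveOuter A fuel i exp arr)[k]? = some (magic k) := by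
  intro fuel
  induction fuel with
  | zero =>
      intro i exp e arr hi hexp hlen hent hfuel k hk
      rw [solveOuter]
      exact hent k (by omega)
  | succ f ih =>
      intro i exp e arr hi hexp hlen hent hfuel k hk
      have hi1 : 1 ≤ i := by rw [hi]; exact one_le_pow₀ (by norm_num)
      by_cases hc : i ≤ A
      · rw [solveOuter, if_pos hc]
        have hiN : i.toNat = 2^e := by
          have : ((2^e : Nat) : Int) = (2:Int)^e := by push_cast; ring
          omega
        have hexpN : exp.toNat = e + 1 := by omega
        have hmagi : ((5:Int) ^ exp.toNat) = magic i.toNat := by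
          rw [hexpN, hiN, magic_pow]
        have hidx : i.toNat < arr.length := by omega
        have hent1 : ∀ k : Nat, (k:Int) < i + 1 →
            (arr.set i.toNat ((5:Int) ^ exp.toNat))[k]? = some (magic k) := by
          intro k hk
          by_cases hki : k = i.toNat
          · subst hki
            rw [List.getElem?_set_self hidx, hmagi]
          · rw [List.getElem?_set_ne (by omega)]
            exact hent k (by omega)
        have hadd : ∀ jN : Nat, jN < i.toNat → magic (i.toNat + jN) = magic i.toNat + magic jN := by
          intro jN hjN
          rw [hiN] at hjN ⊢
          exact magic_add e jN hjN
        obtain ⟨rlen, rj1, rji, rent, rdis⟩ :=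
          inner_spec A i hi1 hc hadd (A.toNat + 1) 1 _ (by omega) hi1
            (by simpa using hlen) hent1 (by omega)
        rcases rdis with hdone | ⟨hji, hiA⟩
        · rw [outer_done A f _ _ _ hdone]
          exact rent k (by omega)
        · refine ih _ (exp+1) (e+1) _ ?_ (by push_cast; omega) rlen ?_ (by omega) k hk
          · rw [hji, hi]; ring
          · intro k hk
            exact rent k (by omega)
      · rw [solveOuter, if_neg hc]
        exact hent k (by omega)

theorem solve_eq (A : Int) (hA : 0 ≤ A) : solve A = magic A.toNat := by
  rw [solve]
  have hlen : ((0 : Int) :: List.replicate A.toNat 0).length = A.toNat + 1 := by simp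
  have hent : ∀ k : Nat, (k:Int) < 1 →
      ((0 : Int) :: List.replicate A.toNat 0)[k]? = some (magic k) := by
    intro k hk
    have : k = 0 := by omega
    subst this
    simp [magic]
  have := outer_spec A (A.toNat + 1) 1 1 0 _ (by norm_num) (by norm_num) hlen hent
    (by omega) A.toNat (by omega)
  rw [PySem.List.pyGet?_of_nonneg _ hA, this]
  rfl

-- ===== VERDICT (by name: the statement is the Claim_ definition above) =====
theorem solve_spec : Claim_equal_solve := by
  intro A _ hpre
  unfold Spec_solve
  by_cases hA : 0 ≤ A
  · rw [solve_eq A hA, solve_alt_eq]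
  · have : A = -1 := by unfold Pre_solve at hpre; omega
    subst this
    decide

theorem solve_raises : Claim_raises_solve := by
  unfold Claim_raises_solve
  exact ⟨fun A _ hR => by unfold Raises_solve Pre_solve at *; omega, by decide⟩

-- corollary keeping the crash-region fact usable: the raise witness is outside Pre_solve
theorem solve_raises_ok : ¬ Pre_solve pvRaiseWitness_solve :=
  solve_raises.1 pvRaiseWitness_solve (by decide) (by decide)
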